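-- pv_equiv track=rewrite | github.com/AnKram/MoscowCityHack | functions.py | get_bucker
-- ===== SOURCE A (Python) =====
-- def get_bucker(integer):
--     data = {
--         'name': ['student', 'junior', 'pre mid', 'middle', 'pre senior', 'senior'],
--         'min_sal': [-1, 50000, 75000, 150000, 220000, 350000],
--         'max_sal': [50000, 75000, 150000, 220000, 350000, 99999999],
--         'description': [
--             'Вы в самом начале своего карьерного пути. Начните с общих курсов, чтобы определить своё направление развития',
--             'Вы уже что-то умеете и не способны самостоятельно развиваться в рабочей команде.',
--             'Вы уже не новичёк, но ещё не можете автономно лидировать задачи по разработке',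
--             'Вы полезный специалист в любой комаде. Продолжайте развиваться, что бы стать незаменимым специалистом в люой команде',
--             'Ваши знания и опыт работы велики, но есть ещё непокорённые вершины в вашем направлении развития',
--             'Поздравляем - вы сеньор-разработчик']
--     }
--     for name, min_sal, max_sal, desc in zip(data['name'], data['min_sal'], data['max_sal'], data['description']):
--         if min_sal < integer <= max_sal:
--             return {name: desc}
--
--     return {'noname': 'молодец'}
-- ===== SOURCE B (Python) =====
-- _NAMES = ['student', 'junior', 'pre mid', 'middle', 'pre senior', 'senior']
-- _MAXS = [50000, 75000, 150000, 220000, 350000, 99999999]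
-- _DESCS = [
--     'Вы в самом начале своего карьерного пути. Начните с общих курсов, чтобы определить своё направление развития',
--     'Вы уже что-то умеете и не способны самостоятельно развиваться в рабочей команде.',
--     'Вы уже не новичёк, но ещё не можете автономно лидировать задачи по разработке',
--     'Вы полезный специалист в любой комаде. Продолжайте развиваться, что бы стать незаменимым специалистом в люой команде',
--     'Ваши знания и опыт работы велики, но есть ещё непокорённые вершины в вашем направлении развития',
--     'Поздравляем - вы сеньор-разработчик']
--
--
-- def get_bucker(integer):
--     # Below the first bucket's exclusive lower bound, or above the last max: no bucket.
--     if integer <= -1 or integer > _MAXS[-1]: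
--         return {'noname': 'молодец'}
--     # Binary search: smallest index with _MAXS[i] >= integer (adjacent buckets share boundaries).
--     lo, hi = 0, len(_MAXS)
--     while lo < hi:
--         mid = (lo + hi) // 2
--         if _MAXS[mid] < integer:
--             lo = mid + 1
--         else:
--             hi = mid
--     return {_NAMES[lo]: _DESCS[lo]}
-- ===== Notes on version B (the rewrite author's own statement) =====
-- stated objective: alternative
-- what changed: Replaced the linear scan over four zipped parallel lists with an explicit lower/upper guard plus a binary search over the sorted upper thresholds (smallest max >= integer), which works because adjacent buckets share boundaries.
import Mathlib
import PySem

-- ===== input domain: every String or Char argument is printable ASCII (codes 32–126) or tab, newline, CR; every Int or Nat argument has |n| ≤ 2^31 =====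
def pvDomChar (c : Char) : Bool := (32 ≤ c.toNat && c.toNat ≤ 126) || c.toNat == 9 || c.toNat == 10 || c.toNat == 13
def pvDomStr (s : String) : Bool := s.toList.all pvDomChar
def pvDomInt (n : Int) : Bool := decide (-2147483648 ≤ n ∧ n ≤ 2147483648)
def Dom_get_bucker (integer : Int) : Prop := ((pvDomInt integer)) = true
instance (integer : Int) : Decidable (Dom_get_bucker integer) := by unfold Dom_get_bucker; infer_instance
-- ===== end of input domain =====

-- B replaces A's linear scan over zipped parallel lists by a guard plus a binary
-- search over the sorted upper thresholds (alternative decomposition, not faster at n = 6).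

-- ===== PORT A =====
-- the four parallel lists of A's `data` dict, zipped entrywise as (name, min_sal, max_sal, desc)
def pvDataA : List (String × Int × Int × String) :=
  [("student", -1, 50000, "Вы в самом начале своего карьерного пути. Начните с общих курсов, чтобы определить своё направление развития"),
   ("junior", 50000, 75000, "Вы уже что-то умеете и не способны самостоятельно развиваться в рабочей команде."),
   ("pre mid", 75000, 150000, "Вы уже не новичёк, но ещё не можете автономно лидировать задачи по разработке"),
   ("middle", 150000, 220000, "Вы полезный специалист в любой комаде. Продолжайте развиваться, что бы стать незаменимым специалистом в люой команде"),
   ("pre senior", 220000, 350000, "Ваши знания и опыт работы велики, но есть ещё непокорённые вершины в вашем направлении развития"),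
   ("senior", 350000, 99999999, "Поздравляем - вы сеньор-разработчик")]

-- A's for-loop with early return; falls through to the 'noname' dict
def pvLoopA (integer : Int) : List (String × Int × Int × String) → List (String × String)
  | [] => [("noname", "молодец")]
  | (name, min_sal, max_sal, desc) :: rest =>
      if min_sal < integer ∧ integer ≤ max_sal then [(name, desc)]
      else pvLoopA integer rest

def get_bucker (integer : Int) : List (String × String) :=
  pvLoopA integer pvDataA

-- ===== PORT B =====
def pvNamesB : List String := ["student", "junior", "pre mid", "middle", "pre senior", "senior"]
def pvMaxsB : List Int := [50000, 75000, 150000, 220000, 350000, 99999999]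
def pvDescsB : List String :=
  ["Вы в самом начале своего карьерного пути. Начните с общих курсов, чтобы определить своё направление развития",
   "Вы уже что-то умеете и не способны самостоятельно развиваться в рабочей команде.",
   "Вы уже не новичёк, но ещё не можете автономно лидировать задачи по разработке",
   "Вы полезный специалист в любой комаде. Продолжайте развиваться, что бы стать незаменимым специалистом в люой команде",
   "Ваши знания и опыт работы велики, но есть ещё непокорённые вершины в вашем направлении развития",
   "Поздравляем - вы сеньор-разработчик"]

-- B's while-loop binary search: smallest index with pvMaxsB[i] >= integer
def pvBsearchB (integer : Int) (lo hi : Nat) : Nat :=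
  if _h : lo < hi then
    let mid := (lo + hi) / 2
    if (pvMaxsB.getD mid 0) < integer then pvBsearchB integer (mid + 1) hi
    else pvBsearchB integer lo mid
  else lo
termination_by hi - lo
decreasing_by all_goals omega

def get_bucker_alt (integer : Int) : List (String × String) :=
  if integer ≤ -1 ∨ integer > 99999999 then [("noname", "молодец")]
  else
    let i := pvBsearchB integer 0 pvMaxsB.length
    [(pvNamesB.getD i "", pvDescsB.getD i "")]

-- ===== PRECONDITION & SPEC =====
def Spec_get_bucker (integer : Int) (out : List (String × String)) : Prop := out = get_bucker_alt integer
instance (integer : Int) (out : List (String × String)) : Decidable (Spec_get_bucker integer out) := by unfold Spec_get_bucker; infer_instance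

-- ===== CLAIM (what is proved, stated in full; the proofs are below) =====
def Claim_equal_get_bucker : Prop := ∀ (integer : Int), Dom_get_bucker integer → Spec_get_bucker integer (get_bucker integer)

-- ===== LEMMAS AND PROOFS =====

theorem bs_self (i : Int) (k : Nat) : pvBsearchB i k k = k := by
  rw [pvBsearchB]; simp

theorem bs01 (i : Int) : pvBsearchB i 0 1 = if 50000 < i then 1 else 0 := by
  rw [pvBsearchB]; norm_num [pvMaxsB, bs_self]

theorem bs23 (i : Int) : pvBsearchB i 2 3 = if 150000 < i then 3 else 2 := by
  rw [pvBsearchB]; norm_num [pvMaxsB, bs_self]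

theorem bs45 (i : Int) : pvBsearchB i 4 5 = if 350000 < i then 5 else 4 := by
  rw [pvBsearchB]; norm_num [pvMaxsB, bs_self]

theorem bs03 (i : Int) : pvBsearchB i 0 3 =
    if 75000 < i then (if 150000 < i then 3 else 2) else if 50000 < i then 1 else 0 := by
  rw [pvBsearchB]; norm_num [pvMaxsB, bs23, bs01]

theorem bs46 (i : Int) : pvBsearchB i 4 6 =
    if 99999999 < i then 6 else if 350000 < i then 5 else 4 := by
  rw [pvBsearchB]; norm_num [pvMaxsB, bs_self, bs45]

theorem bs_eval (i : Int) : pvBsearchB i 0 6 =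
    if 220000 < i then (if 99999999 < i then 6 else if 350000 < i then 5 else 4)
    else if 75000 < i then (if 150000 < i then 3 else 2)
    else if 50000 < i then 1 else 0 := by
  rw [pvBsearchB]; norm_num [pvMaxsB, bs46, bs03]

-- ===== VERDICT (by name: the statement is the Claim_ definition above) =====
theorem get_bucker_spec : Claim_equal_get_bucker := by
  intro integer _
  unfold Spec_get_bucker get_bucker get_bucker_alt pvDataA
  simp only [pvLoopA, pvMaxsB, List.length]
  rw [show (0 + 1 + 1 + 1 + 1 + 1 + 1 : Nat) = 6 from rfl, bs_eval]
  split_ifs <;> simp_all [pvNamesB, pvDescsB] <;> omega
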